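-- pv_equiv track=rewrite | github.com/mahmedddd/ezsell | ezsell/ezsell/backend/ml_pipeline/advanced_feature_extractor.py | _get_laptop_brand_premium
-- ===== SOURCE A (Python) =====
-- def _get_laptop_brand_premium(text: str) -> int:
--     """Score laptop brand premium (1-5)"""
--     if any(x in text for x in ['macbook', 'apple']):
--         return 5
--     elif any(x in text for x in ['alienware', 'razer', 'msi']):
--         return 4
--     elif any(x in text for x in ['dell', 'hp', 'lenovo', 'asus']):
--         return 3
--     elif any(x in text for x in ['acer', 'toshiba']):
--         return 2
--     return 1
-- ===== SOURCE B (Python) =====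
-- # B: flat keyword->score table reduced by max (default 1) instead of an ordered if/elif cascade.
-- _BRAND_SCORES = [
--     ('macbook', 5), ('apple', 5),
--     ('alienware', 4), ('razer', 4), ('msi', 4),
--     ('dell', 3), ('hp', 3), ('lenovo', 3), ('asus', 3),
--     ('acer', 2), ('toshiba', 2),
-- ]
--
-- def _get_laptop_brand_premium(text: str) -> int:
--     return max((score for kw, score in _BRAND_SCORES if kw in text), default=1)
-- ===== Notes on version B (the rewrite author's own statement) =====
-- stated objective: simpler
-- what changed: Replaced the ordered if/elif tier cascade with a flat (keyword, score) table reduced by max with default 1; correct because tier scores are strictly ranked, so the max of all matching keywords equals the first matching tier.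
import Mathlib
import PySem

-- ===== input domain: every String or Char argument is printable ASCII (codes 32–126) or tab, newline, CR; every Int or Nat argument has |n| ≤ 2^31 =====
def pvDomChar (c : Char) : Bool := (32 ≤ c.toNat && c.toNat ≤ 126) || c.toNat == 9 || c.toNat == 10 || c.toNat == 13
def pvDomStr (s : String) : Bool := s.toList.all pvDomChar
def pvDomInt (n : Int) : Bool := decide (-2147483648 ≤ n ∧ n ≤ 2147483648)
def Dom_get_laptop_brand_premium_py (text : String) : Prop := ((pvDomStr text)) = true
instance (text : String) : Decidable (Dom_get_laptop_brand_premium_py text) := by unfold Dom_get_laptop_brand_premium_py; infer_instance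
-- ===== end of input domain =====

-- B replaces A's ordered if/elif tier cascade with a flat keyword→score table reduced by max (default 1); simpler, same cost.


-- ===== PORT A =====
def get_laptop_brand_premium_py (text : String) : Int :=
  if ["macbook", "apple"].any (fun x => PySem.Str.isIn x text) then 5
  else if ["alienware", "razer", "msi"].any (fun x => PySem.Str.isIn x text) then 4
  else if ["dell", "hp", "lenovo", "asus"].any (fun x => PySem.Str.isIn x text) then 3
  else if ["acer", "toshiba"].any (fun x => PySem.Str.isIn x text) then 2
  else 1

-- ===== PORT B =====
def pvBrandScores : List (String × Int) :=
  [("macbook", 5), ("apple", 5),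
   ("alienware", 4), ("razer", 4), ("msi", 4),
   ("dell", 3), ("hp", 3), ("lenovo", 3), ("asus", 3),
   ("acer", 2), ("toshiba", 2)]

-- max(generator, default=1): max? of the matching scores, 1 when none match
def get_laptop_brand_premium_py_alt (text : String) : Int :=
  match PySem.List.max?
      ((pvBrandScores.filter (fun p => PySem.Str.isIn p.1 text)).map Prod.snd)
      (fun y => y) with
  | some m => m
  | none => 1

-- ===== PRECONDITION & SPEC =====
def Spec_get_laptop_brand_premium_py (text : String) (out : Int) : Prop := out = get_laptop_brand_premium_py_alt text
instance (text : String) (out : Int) : Decidable (Spec_get_laptop_brand_premium_py text out) := by unfold Spec_get_laptop_brand_premium_py; infer_instance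

-- ===== CLAIM (what is proved, stated in full; the proofs are below) =====
def Claim_equal_get_laptop_brand_premium_py : Prop := ∀ (text : String), Dom_get_laptop_brand_premium_py text → Spec_get_laptop_brand_premium_py text (get_laptop_brand_premium_py text)

-- ===== LEMMAS AND PROOFS =====

def pvL (text : String) : List Int :=
  (pvBrandScores.filter (fun p => PySem.Str.isIn p.1 text)).map Prod.snd

-- B's "max with default 1" equals m whenever m is a member and an upper bound of the score list.
theorem pv_maxD_eq (L : List Int) (m : Int) (hm : m ∈ L) (hub : ∀ x ∈ L, x ≤ m) :
    (match PySem.List.max? L (fun y => y) with | some v => v | none => 1) = m := by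
  cases hmax : PySem.List.max? L (fun y => y) with
  | none =>
    rw [Iff.mp (PySem.List.max?_eq_none_iff _ _) hmax] at hm
    exact absurd hm List.not_mem_nil
  | some v =>
    have hv : v ∈ L := PySem.List.max?_mem hmax
    exact le_antisymm (hub v hv) (PySem.List.max?_isMax hmax m hm)

theorem pv_mem_score (text : String) (kw : String) (s : Int) (hkw : (kw, s) ∈ pvBrandScores)
    (h : PySem.Str.isIn kw text = true) : s ∈ pvL text := by
  simp only [pvL, List.mem_map, List.mem_filter]
  exact ⟨(kw, s), ⟨hkw, h⟩, rfl⟩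

-- Every score of a matching keyword is at most 5.
theorem pv_mem_le5 (text : String) (x : Int) (hx : x ∈ pvL text) : x ≤ 5 := by
  simp only [pvL, pvBrandScores, List.mem_map, List.mem_filter] at hx
  obtain ⟨p, ⟨hpm, _⟩, rfl⟩ := hx
  fin_cases hpm <;> norm_num

-- If no tier-5 keyword matches, every matching score is at most 4 (and so on down the tiers).
theorem pv_mem_le4 (text : String) (h1 : PySem.Str.isIn "macbook" text = false)
    (h2 : PySem.Str.isIn "apple" text = false) (x : Int) (hx : x ∈ pvL text) : x ≤ 4 := by
  simp only [pvL, pvBrandScores, List.mem_map, List.mem_filter] at hx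
  obtain ⟨p, ⟨hpm, hpf⟩, rfl⟩ := hx
  fin_cases hpm <;> simp_all

theorem pv_mem_le3 (text : String) (h1 : PySem.Str.isIn "macbook" text = false)
    (h2 : PySem.Str.isIn "apple" text = false) (h3 : PySem.Str.isIn "alienware" text = false)
    (h4 : PySem.Str.isIn "razer" text = false) (h5 : PySem.Str.isIn "msi" text = false) (x : Int)
    (hx : x ∈ pvL text) : x ≤ 3 := by
  simp only [pvL, pvBrandScores, List.mem_map, List.mem_filter] at hx
  obtain ⟨p, ⟨hpm, hpf⟩, rfl⟩ := hx
  fin_cases hpm <;> simp_all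

theorem pv_mem_le2 (text : String) (h1 : PySem.Str.isIn "macbook" text = false)
    (h2 : PySem.Str.isIn "apple" text = false) (h3 : PySem.Str.isIn "alienware" text = false)
    (h4 : PySem.Str.isIn "razer" text = false) (h5 : PySem.Str.isIn "msi" text = false)
    (h6 : PySem.Str.isIn "dell" text = false) (h7 : PySem.Str.isIn "hp" text = false)
    (h8 : PySem.Str.isIn "lenovo" text = false) (h9 : PySem.Str.isIn "asus" text = false) (x : Int)
    (hx : x ∈ pvL text) : x ≤ 2 := by
  simp only [pvL, pvBrandScores, List.mem_map, List.mem_filter] at hx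
  obtain ⟨p, ⟨hpm, hpf⟩, rfl⟩ := hx
  fin_cases hpm <;> simp_all

-- ===== VERDICT (by name: the statement is the Claim_ definition above) =====
theorem get_laptop_brand_premium_py_spec : Claim_equal_get_laptop_brand_premium_py := by
  intro text _
  unfold Spec_get_laptop_brand_premium_py get_laptop_brand_premium_py get_laptop_brand_premium_py_alt
  show _ = (match PySem.List.max? (pvL text) (fun y => y) with | some v => v | none => 1)
  simp only [List.any_cons, List.any_nil, Bool.or_false, Bool.or_eq_true]
  split_ifs with hT5 hT4 hT3 hT2
  · rcases hT5 with h | h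
    · exact (pv_maxD_eq _ 5 (pv_mem_score text "macbook" 5 (by simp [pvBrandScores]) h) (pv_mem_le5 text)).symm
    · exact (pv_maxD_eq _ 5 (pv_mem_score text "apple" 5 (by simp [pvBrandScores]) h) (pv_mem_le5 text)).symm
  · push Not at hT5
    obtain ⟨h1, h2⟩ := hT5
    simp only [ne_eq, Bool.not_eq_true] at h1 h2
    rcases hT4 with h | h | h
    · exact (pv_maxD_eq _ 4 (pv_mem_score text "alienware" 4 (by simp [pvBrandScores]) h) (pv_mem_le4 text h1 h2)).symm
    · exact (pv_maxD_eq _ 4 (pv_mem_score text "razer" 4 (by simp [pvBrandScores]) h) (pv_mem_le4 text h1 h2)).symm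
    · exact (pv_maxD_eq _ 4 (pv_mem_score text "msi" 4 (by simp [pvBrandScores]) h) (pv_mem_le4 text h1 h2)).symm
  · push Not at hT5 hT4
    obtain ⟨h1, h2⟩ := hT5
    obtain ⟨h3, h4, h5⟩ := hT4
    simp only [ne_eq, Bool.not_eq_true] at h1 h2 h3 h4 h5
    rcases hT3 with h | h | h | h
    · exact (pv_maxD_eq _ 3 (pv_mem_score text "dell" 3 (by simp [pvBrandScores]) h) (pv_mem_le3 text h1 h2 h3 h4 h5)).symm
    · exact (pv_maxD_eq _ 3 (pv_mem_score text "hp" 3 (by simp [pvBrandScores]) h) (pv_mem_le3 text h1 h2 h3 h4 h5)).symm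
    · exact (pv_maxD_eq _ 3 (pv_mem_score text "lenovo" 3 (by simp [pvBrandScores]) h) (pv_mem_le3 text h1 h2 h3 h4 h5)).symm
    · exact (pv_maxD_eq _ 3 (pv_mem_score text "asus" 3 (by simp [pvBrandScores]) h) (pv_mem_le3 text h1 h2 h3 h4 h5)).symm
  · push Not at hT5 hT4 hT3
    obtain ⟨h1, h2⟩ := hT5
    obtain ⟨h3, h4, h5⟩ := hT4
    obtain ⟨h6, h7, h8, h9⟩ := hT3
    simp only [ne_eq, Bool.not_eq_true] at h1 h2 h3 h4 h5 h6 h7 h8 h9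
    rcases hT2 with h | h
    · exact (pv_maxD_eq _ 2 (pv_mem_score text "acer" 2 (by simp [pvBrandScores]) h)
        (pv_mem_le2 text h1 h2 h3 h4 h5 h6 h7 h8 h9)).symm
    · exact (pv_maxD_eq _ 2 (pv_mem_score text "toshiba" 2 (by simp [pvBrandScores]) h)
        (pv_mem_le2 text h1 h2 h3 h4 h5 h6 h7 h8 h9)).symm
  · push Not at hT5 hT4 hT3 hT2
    obtain ⟨h1, h2⟩ := hT5
    obtain ⟨h3, h4, h5⟩ := hT4
    obtain ⟨h6, h7, h8, h9⟩ := hT3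
    obtain ⟨h10, h11⟩ := hT2
    simp only [ne_eq, Bool.not_eq_true] at h1 h2 h3 h4 h5 h6 h7 h8 h9 h10 h11
    have hL : pvL text = [] := by
      simp only [pvL, pvBrandScores, List.filter_cons, List.filter_nil,
        h1, h2, h3, h4, h5, h6, h7, h8, h9, h10, h11, Bool.false_eq_true, if_false, List.map_nil]
    rw [hL]
    rfl
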